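-- pv_equiv track=rewrite | github.com/preciousadegoke/TonGPT | services/tonapi.py | _classify_transaction_type
-- ===== SOURCE A (Python) =====
-- from typing import Dict, List, Optional, Union
--
-- def _classify_transaction_type(event: Dict) -> str:
--     """Classify transaction type"""
--     try:
--         actions = event.get('actions', [])
--         if not actions:
--             return 'unknown'
--
--         action_types = [action.get('type', '') for action in actions]
--
--         if 'TonTransfer' in action_types:
--             return 'ton_transfer'
--         elif 'JettonTransfer' in action_types:
--             return 'jetton_transfer'
--         elif 'ContractDeploy' in action_types:
--             return 'contract_deploy'
--         else:
--             return 'other'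
--     except:
--         return 'unknown'
-- ===== SOURCE B (Python) =====
-- _RANK = {'TonTransfer': 0, 'JettonTransfer': 1, 'ContractDeploy': 2}
-- _LABEL = ['ton_transfer', 'jetton_transfer', 'contract_deploy', 'other']
--
-- def _classify_transaction_type(event) -> str:
--     """Classify transaction type"""
--     try:
--         actions = event.get('actions', [])
--         if not actions:
--             return 'unknown'
--         best = 3
--         for action in actions:
--             r = _RANK.get(action.get('type', ''), 3)
--             if r < best:
--                 best = r
--         return _LABEL[best]
--     except:
--         return 'unknown'
-- ===== Notes on version B (the rewrite author's own statement) =====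
-- stated objective: alternative
-- what changed: Replaces building a full action_types list plus three separate membership scans with a single pass over the actions that keeps a running minimum priority rank, then maps the final rank to its label.
import Mathlib
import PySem

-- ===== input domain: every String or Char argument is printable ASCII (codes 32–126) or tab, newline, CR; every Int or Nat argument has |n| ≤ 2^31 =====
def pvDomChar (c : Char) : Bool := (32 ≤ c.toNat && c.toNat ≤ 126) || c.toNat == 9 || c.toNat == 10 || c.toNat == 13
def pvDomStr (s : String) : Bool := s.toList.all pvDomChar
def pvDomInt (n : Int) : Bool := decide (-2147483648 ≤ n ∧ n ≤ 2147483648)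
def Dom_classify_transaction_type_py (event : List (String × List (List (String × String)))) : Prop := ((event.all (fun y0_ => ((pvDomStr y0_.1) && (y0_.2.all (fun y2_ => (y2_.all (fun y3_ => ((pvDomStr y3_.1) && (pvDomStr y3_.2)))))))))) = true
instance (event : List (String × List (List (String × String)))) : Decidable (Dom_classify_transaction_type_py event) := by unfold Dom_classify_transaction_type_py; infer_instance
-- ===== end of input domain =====

-- B replaces A's action_types list plus three membership scans by one pass keeping a running
-- minimum priority rank (alternative decomposition; no speed claim).

-- ===== PORT A =====
def classify_transaction_type_py (event : List (String × List (List (String × String)))) : String :=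
  let actions := PySem.Dict.getD (PySem.Dict.mk event) "actions" []
  if actions = [] then "unknown"
  else
    let action_types := actions.map (fun action => PySem.Dict.getD (PySem.Dict.mk action) "type" "")
    if action_types.contains "TonTransfer" then "ton_transfer"
    else if action_types.contains "JettonTransfer" then "jetton_transfer"
    else if action_types.contains "ContractDeploy" then "contract_deploy"
    else "other"

-- ===== PORT B =====
-- _RANK.get(t, 3)
def pvRank (t : String) : Nat :=
  PySem.Dict.getD (PySem.Dict.mk [("TonTransfer", (0:Nat)), ("JettonTransfer", 1), ("ContractDeploy", 2)]) t 3

-- _LABEL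
def pvLabel : List String := ["ton_transfer", "jetton_transfer", "contract_deploy", "other"]

def classify_transaction_type_py_alt (event : List (String × List (List (String × String)))) : String :=
  let actions := PySem.Dict.getD (PySem.Dict.mk event) "actions" []
  if actions = [] then "unknown"
  else
    let best := actions.foldl (fun best action =>
      let r := pvRank (PySem.Dict.getD (PySem.Dict.mk action) "type" "")
      if r < best then r else best) 3
    pvLabel.getD best ""

-- ===== PRECONDITION & SPEC =====
def Spec_classify_transaction_type_py (event : List (String × List (List (String × String)))) (out : String) : Prop := out = classify_transaction_type_py_alt event
instance (event : List (String × List (List (String × String)))) (out : String) : Decidable (Spec_classify_transaction_type_py event out) := by unfold Spec_classify_transaction_type_py; infer_instance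

-- ===== CLAIM (what is proved, stated in full; the proofs are below) =====
def Claim_equal_classify_transaction_type_py : Prop := ∀ (event : List (String × List (List (String × String)))), Dom_classify_transaction_type_py event → Spec_classify_transaction_type_py event (classify_transaction_type_py event)

-- ===== LEMMAS AND PROOFS =====

-- B's min-rank fold over the actions equals A's cascade of membership tests over action_types
theorem pv_fold_char (acts : List (List (String × String))) (b : Nat) (hb : b ≤ 3) :
    acts.foldl (fun best action =>
        let r := pvRank (PySem.Dict.getD (PySem.Dict.mk action) "type" "")
        if r < best then r else best) b =
      (if (acts.map (fun action => PySem.Dict.getD (PySem.Dict.mk action) "type" "")).contains "TonTransfer" then min b 0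
       else if (acts.map (fun action => PySem.Dict.getD (PySem.Dict.mk action) "type" "")).contains "JettonTransfer" then min b 1
       else if (acts.map (fun action => PySem.Dict.getD (PySem.Dict.mk action) "type" "")).contains "ContractDeploy" then min b 2
       else b) := by
  induction acts generalizing b with
  | nil => simp
  | cons a acts ih =>
    simp only [List.foldl_cons, List.map_cons, List.contains_cons]
    generalize PySem.Dict.getD (PySem.Dict.mk a) "type" "" = t
    by_cases h0 : t = "TonTransfer"
    · subst h0
      have hr : pvRank "TonTransfer" = 0 := by decide
      simp only [hr]
      rw [ih _ (by split <;> omega)]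
      simp only [BEq.rfl, Bool.true_or]
      split_ifs <;> omega
    · by_cases h1 : t = "JettonTransfer"
      · subst h1
        have hr : pvRank "JettonTransfer" = 1 := by decide
        simp only [hr]
        rw [ih _ (by split <;> omega)]
        simp
        split_ifs <;> omega
      · by_cases h2 : t = "ContractDeploy"
        · subst h2
          have hr : pvRank "ContractDeploy" = 2 := by decide
          simp only [hr]
          rw [ih _ (by split <;> omega)]
          simp
          split_ifs <;> omega
        · have hr : pvRank t = 3 := by
            simp [pvRank, PySem.Dict.getD, PySem.Dict.get?,
                  Ne.symm h0, Ne.symm h1, Ne.symm h2]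
          simp only [hr, if_neg (by omega : ¬ 3 < b)]
          rw [ih _ hb]
          simp [Ne.symm h0, Ne.symm h1, Ne.symm h2]

-- ===== VERDICT (by name: the statement is the Claim_ definition above) =====
theorem classify_transaction_type_py_spec : Claim_equal_classify_transaction_type_py := by
  intro event _
  unfold Spec_classify_transaction_type_py classify_transaction_type_py classify_transaction_type_py_alt
  set actions := PySem.Dict.getD (PySem.Dict.mk event) "actions" [] with hacts
  by_cases h : actions = []
  · simp [h]
  · simp only [if_neg h]
    rw [pv_fold_char _ 3 (le_refl 3)]
    split_ifs <;> decide
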